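-- pv_equiv track=rewrite | github.com/Eran-Levy-git/Leetcode | fairSplit.py | fairSplit
-- ===== SOURCE A (Python) =====
-- def fairSplit(A, B) -> int:
--     """
--     This function finds the index in arrays A and B where they can be split into two non-empty subarrays each, such that the sums of elements in corresponding subarrays of A and B are equal.
--
--     Returns:
--         int: The index at which the split can be made, or -1 if no such split exists.
--     """
--
--     N = len(A)
--
--     # Precompute prefix sums using list comprehension for efficiency
--     prefix_sum_A = [0] * (N + 1)
--     prefix_sum_B = [0] * (N + 1)
--     for i in range(1, N + 1):
--         prefix_sum_A[i] = prefix_sum_A[i - 1] + A[i - 1]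
--         prefix_sum_B[i] = prefix_sum_B[i - 1] + B[i - 1]
--
--     # Check for fair splits at each index for clarity and efficiency
--     for k in range(1, N):
--         if prefix_sum_A[k] == prefix_sum_B[k]:
--             if (
--                 prefix_sum_A[N] - prefix_sum_A[k]
--                 == prefix_sum_B[N] - prefix_sum_B[k]
--             ):
--                 return k  # Fair split found
--
--     return -1  # No fair split found
-- ===== SOURCE B (Python) =====
-- def fairSplit(A, B) -> int:
--     n = len(A)
--     # Scan back-to-front maintaining suffix sums; each time the suffixes agree,
--     # overwrite `best`, so at the end `best` is the SMALLEST such split index.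
--     # Continuing the accumulation through index 0 yields the two totals, and
--     # (suffixes equal at k) AND (totals equal) <=> A's prefix+suffix condition.
--     sufA = sufB = 0
--     best = -1
--     for k in range(n - 1, 0, -1):
--         sufA += A[k]
--         sufB += B[k]
--         if sufA == sufB:
--             best = k
--     if n > 0:
--         sufA += A[0]
--         sufB += B[0]
--     return best if sufA == sufB else -1
-- ===== Notes on version B (the rewrite author's own statement) =====
-- stated objective: alternative
-- what changed: B traverses the arrays back-to-front with running suffix sums and no early return: each suffix match overwrites `best` so the smallest index survives, and extending the same accumulation through index 0 yields the totals whose equality decides the final answer, replacing A's prefix-sum arrays and forward first-match scan with per-index suffix comparisons (no arrays built: constant extra space, less per-element work).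
import Mathlib
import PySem

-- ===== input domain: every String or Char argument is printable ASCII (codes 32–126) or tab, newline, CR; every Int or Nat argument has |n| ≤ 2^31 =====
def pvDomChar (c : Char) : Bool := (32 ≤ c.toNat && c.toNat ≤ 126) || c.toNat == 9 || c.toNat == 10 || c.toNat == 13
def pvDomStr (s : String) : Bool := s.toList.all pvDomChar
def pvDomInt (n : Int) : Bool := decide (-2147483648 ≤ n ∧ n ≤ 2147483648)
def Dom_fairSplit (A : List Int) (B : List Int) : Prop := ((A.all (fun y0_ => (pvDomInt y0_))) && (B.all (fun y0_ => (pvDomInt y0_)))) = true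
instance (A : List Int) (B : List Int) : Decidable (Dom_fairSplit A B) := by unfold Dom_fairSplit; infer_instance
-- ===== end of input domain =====

-- B replaces A's forward prefix-sum-array scan by a back-to-front running-suffix-sum
-- traversal with no early return; equivalence of the two traversal orders is proved.


-- ===== PORT A =====
-- the 'for k in range(1, N)' search loop; indices are in range under Pre_, so getD is exact there
def fairSplitLoopA (psA psB : List Int) (N k : Nat) : Int :=
  if k < N then
    if psA.getD k 0 = psB.getD k 0 ∧
       psA.getD N 0 - psA.getD k 0 = psB.getD N 0 - psB.getD k 0 then
      (k : Int)
    else fairSplitLoopA psA psB N (k + 1)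
  else -1
termination_by N - k

def fairSplit (A : List Int) (B : List Int) : Int :=
  let N := A.length
  -- the 'for i in range(1, N+1)' loop filling prefix_sum_A / prefix_sum_B
  let ps := (List.range' 1 N).foldl
    (fun (p : List Int × List Int) i =>
      (p.1 ++ [p.1.getD (i - 1) 0 + A.getD (i - 1) 0],
       p.2 ++ [p.2.getD (i - 1) 0 + B.getD (i - 1) 0]))
    ([0], [0])
  fairSplitLoopA ps.1 ps.2 N 1

-- ===== PORT B =====
-- the 'for k in range(n-1, 0, -1)' backward loop: argument k is the current index,
-- counting down to 1; returns (sufA, sufB, best). Indices are in range under Pre_.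
def fairSplitAltLoop (A B : List Int) : Nat → Int → Int → Int → Int × Int × Int
  | 0, sA, sB, best => (sA, sB, best)
  | k + 1, sA, sB, best =>
      let sA' := sA + A.getD (k + 1) 0
      let sB' := sB + B.getD (k + 1) 0
      fairSplitAltLoop A B k sA' sB' (if sA' = sB' then ((k + 1 : Nat) : Int) else best)

def fairSplit_alt (A : List Int) (B : List Int) : Int :=
  let n := A.length
  let p := fairSplitAltLoop A B (n - 1) 0 0 (-1)
  -- 'if n > 0: sufA += A[0]; sufB += B[0]'
  let sA := if 0 < n then p.1 + A.getD 0 0 else p.1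
  let sB := if 0 < n then p.2.1 + B.getD 0 0 else p.2.1
  if sA = sB then p.2.2 else -1

-- ===== PRECONDITION & SPEC =====
-- Pre_ excludes inputs with len(B) < len(A), on which Python A raises IndexError at B[i-1].
def Pre_fairSplit (A : List Int) (B : List Int) : Prop := A.length ≤ B.length
instance (A : List Int) (B : List Int) : Decidable (Pre_fairSplit A B) := by unfold Pre_fairSplit; infer_instance
def pvWitness_fairSplit : List Int × List Int := ([1, 2], [2, 1])

def Spec_fairSplit (A : List Int) (B : List Int) (out : Int) : Prop := out = fairSplit_alt A B
instance (A : List Int) (B : List Int) (out : Int) : Decidable (Spec_fairSplit A B out) := by unfold Spec_fairSplit; infer_instance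

-- ===== CLAIM (what is proved, stated in full; the proofs are below) =====
def Claim_equal_fairSplit : Prop := ∀ (A : List Int) (B : List Int), Dom_fairSplit A B → Pre_fairSplit A B → Spec_fairSplit A B (fairSplit A B)

-- ===== LEMMAS AND PROOFS =====

-- sum of the first i elements, read with getD (total in i)
def pvS (L : List Int) (i : Nat) : Int := ((List.range i).map (fun t => L.getD t 0)).sum

-- sum of elements at indices j..k (empty if k+1 ≤ j)
def pvSeg (L : List Int) (j k : Nat) : Int := ((List.range' j (k + 1 - j)).map (fun t => L.getD t 0)).sum

theorem pvS_succ (L : List Int) (i : Nat) : pvS L (i + 1) = pvS L i + L.getD i 0 := by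
  simp [pvS, List.range_succ]

theorem getD_map_range (f : Nat → Int) (m j : Nat) :
    ((List.range m).map f).getD j 0 = if j < m then f j else 0 := by
  rcases Nat.lt_or_ge j m with h | h
  · rw [List.getD_eq_getElem?_getD]
    simp [h]
  · rw [List.getD_eq_getElem?_getD]
    have : (List.range m)[j]? = none := by simp [h]
    simp [List.getElem?_map, this]
    omega

theorem build_eq (A B : List Int) (n : Nat) :
    (List.range' 1 n).foldl
      (fun (p : List Int × List Int) i =>
        (p.1 ++ [p.1.getD (i - 1) 0 + A.getD (i - 1) 0],
         p.2 ++ [p.2.getD (i - 1) 0 + B.getD (i - 1) 0]))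
      ([0], [0])
    = ((List.range (n + 1)).map (pvS A), (List.range (n + 1)).map (pvS B)) := by
  induction n with
  | zero => simp [pvS]
  | succ m ih =>
    have : List.range' 1 (m + 1) = List.range' 1 m ++ [1 + m] := by
      simpa using List.range'_concat (s := 1) (n := m) (step := 1)
    rw [this, List.foldl_append, ih]
    simp only [List.foldl_cons, List.foldl_nil]
    have h1 : (1 + m) - 1 = m := by omega
    rw [h1]
    rw [getD_map_range (pvS A) (m + 1) m, getD_map_range (pvS B) (m + 1) m]
    simp only [Nat.lt_succ_self, if_pos]
    rw [← pvS_succ, ← pvS_succ]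
    have h2 : List.range (m + 1 + 1) = List.range (m + 1) ++ [m + 1] := List.range_succ
    rw [h2]
    simp

theorem pvSeg_concat (L : List Int) (j k : Nat) (h : j ≤ k + 1) :
    pvSeg L j (k + 1) = pvSeg L j k + L.getD (k + 1) 0 := by
  unfold pvSeg
  have h1 : k + 1 + 1 - j = (k + 1 - j) + 1 := by omega
  rw [h1, List.range'_concat]
  have h2 : j + 1 * (k + 1 - j) = k + 1 := by omega
  rw [h2]
  simp

-- pvS L n = pvS L j + (sum of indices j..n-1), for 1 ≤ j ≤ n
theorem pvS_split (L : List Int) (j n : Nat) (h1 : 1 ≤ j) (h2 : j ≤ n) :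
    pvS L n = pvS L j + pvSeg L j (n - 1) := by
  unfold pvS pvSeg
  have hr : List.range n = List.range j ++ List.range' j (n - 1 + 1 - j) := by
    have : n - 1 + 1 - j = n - j := by omega
    rw [this]
    rw [List.range_eq_range', List.range_eq_range']
    have := List.range'_append (s := 0) (m := j) (n := n - j) (step := 1)
    simp only [Nat.one_mul, Nat.zero_add] at this
    rw [this]
    congr 1
    omega
  rw [hr]
  simp

theorem find?_congr_mem {α : Type} (l : List α) (p q : α → Bool)
    (h : ∀ a ∈ l, p a = q a) : l.find? p = l.find? q := by
  induction l with
  | nil => rfl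
  | cons x xs ih =>
    have hx := h x (by simp)
    rw [List.find?_cons, List.find?_cons, hx]
    cases hq : q x with
    | true => rfl
    | false => exact ih (fun a ha => h a (by simp [ha]))

-- running suffix sums of the backward loop
theorem alt_sums (A B : List Int) :
    ∀ (k : Nat) (sA sB best : Int),
      (fairSplitAltLoop A B k sA sB best).1 = sA + pvSeg A 1 k ∧
      (fairSplitAltLoop A B k sA sB best).2.1 = sB + pvSeg B 1 k := by
  intro k
  induction k with
  | zero => intro sA sB best; simp [fairSplitAltLoop, pvSeg]
  | succ m ih =>
    intro sA sB best
    rw [fairSplitAltLoop]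
    obtain ⟨h1, h2⟩ := ih (sA + A.getD (m + 1) 0) (sB + B.getD (m + 1) 0)
      (if sA + A.getD (m + 1) 0 = sB + B.getD (m + 1) 0 then ((m + 1 : Nat) : Int) else best)
    constructor
    · rw [h1, pvSeg_concat A 1 m (by omega)]; ring
    · rw [h2, pvSeg_concat B 1 m (by omega)]; ring

-- the 'best' slot: the first index j in 1..k whose (offset) suffix sums agree, else the carried best
theorem alt_best (A B : List Int) :
    ∀ (k : Nat) (sA sB best : Int),
      (fairSplitAltLoop A B k sA sB best).2.2 =
        match (List.range' 1 k).find?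
            (fun j => decide (sA + pvSeg A j k = sB + pvSeg B j k)) with
        | some j => (j : Int)
        | none => best := by
  intro k
  induction k with
  | zero => intro sA sB best; simp [fairSplitAltLoop]
  | succ m ih =>
    intro sA sB best
    rw [fairSplitAltLoop]
    rw [ih]
    have hpred : ∀ j ∈ List.range' 1 m,
        (decide (sA + A.getD (m + 1) 0 + pvSeg A j m = sB + B.getD (m + 1) 0 + pvSeg B j m))
        = (decide (sA + pvSeg A j (m + 1) = sB + pvSeg B j (m + 1))) := by
      intro j hj
      have hjm : j ≤ m + 1 := by
        have := List.mem_range'_1.mp hj; omega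
      rw [pvSeg_concat A j m hjm, pvSeg_concat B j m hjm]
      apply decide_eq_decide.mpr
      constructor <;> intro h <;> linarith
    rw [find?_congr_mem _ _ _ hpred]
    have hconc : List.range' 1 (m + 1) = List.range' 1 m ++ [1 + m] := by
      simpa using List.range'_concat (s := 1) (n := m) (step := 1)
    rw [hconc, List.find?_append]
    cases hf : (List.range' 1 m).find?
        (fun j => decide (sA + pvSeg A j (m + 1) = sB + pvSeg B j (m + 1))) with
    | some j => simp
    | none =>
      simp only [Option.none_or]
      have h1m : 1 + m = m + 1 := by omega
      rw [h1m]
      have hseg : ∀ (L : List Int), pvSeg L (m + 1) (m + 1) = L.getD (m + 1) 0 := by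
        intro L; simp [pvSeg]
      rw [List.find?_cons]
      by_cases hc : sA + A.getD (m + 1) 0 = sB + B.getD (m + 1) 0
      · rw [if_pos hc]
        have hd : (decide (sA + pvSeg A (m + 1) (m + 1) = sB + pvSeg B (m + 1) (m + 1))) = true := by
          rw [hseg A, hseg B]; exact decide_eq_true hc
        rw [hd]
      · rw [if_neg hc]
        have hd : (decide (sA + pvSeg A (m + 1) (m + 1) = sB + pvSeg B (m + 1) (m + 1))) = false := by
          rw [hseg A, hseg B]; exact decide_eq_false hc
        rw [hd]
        simp

-- A's search loop over the prefix arrays, as a first-match over range' 1 (N-1)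
theorem fwd_char (A B : List Int) (N : Nat) :
    ∀ (fuel k : Nat), fuel = N - k →
      fairSplitLoopA ((List.range (N + 1)).map (pvS A)) ((List.range (N + 1)).map (pvS B)) N k =
        match (List.range' k (N - k)).find?
            (fun j => decide (pvS A j = pvS B j ∧
                              pvS A N - pvS A j = pvS B N - pvS B j)) with
        | some j => (j : Int)
        | none => -1 := by
  intro fuel
  induction fuel with
  | zero =>
    intro k hf
    have hkN : ¬ k < N := by omega
    have : N - k = 0 := by omega
    rw [fairSplitLoopA, if_neg hkN, this]
    simp
  | succ m ih =>
    intro k hf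
    rcases Nat.lt_or_ge k N with hkN | hkN
    · rw [fairSplitLoopA, if_pos hkN]
      have hNk : N - k = (N - (k + 1)) + 1 := by omega
      rw [hNk, List.range'_succ, List.find?_cons]
      rw [getD_map_range (pvS A) (N + 1) k, getD_map_range (pvS B) (N + 1) k,
          getD_map_range (pvS A) (N + 1) N, getD_map_range (pvS B) (N + 1) N]
      simp only [if_pos (by omega : k < N + 1), if_pos (by omega : N < N + 1)]
      by_cases hc : pvS A k = pvS B k ∧ pvS A N - pvS A k = pvS B N - pvS B k
      · rw [if_pos hc]
        have hd : (decide (pvS A k = pvS B k ∧ pvS A N - pvS A k = pvS B N - pvS B k)) = true :=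
          decide_eq_true hc
        rw [hd]
      · rw [if_neg hc]
        have hd : (decide (pvS A k = pvS B k ∧ pvS A N - pvS A k = pvS B N - pvS B k)) = false := by
          simpa using hc
        rw [hd]
        exact ih (k + 1) (by omega)
    · have : N - k = 0 := by omega
      rw [fairSplitLoopA, if_neg (by omega), this]
      simp

-- ===== VERDICT (by name: the statement is the Claim_ definition above) =====
theorem fairSplit_spec : Claim_equal_fairSplit := by
  intro A B _ _
  unfold Spec_fairSplit fairSplit fairSplit_alt
  simp only []
  rw [build_eq A B A.length]
  rw [fwd_char A B A.length (A.length - 1) 1 rfl]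
  set n := A.length with hn
  obtain ⟨hsA, hsB⟩ := alt_sums A B (n - 1) 0 0 (-1)
  rw [alt_best A B (n - 1) 0 0 (-1)] at *
  rcases Nat.eq_zero_or_pos n with h0 | hpos
  · -- n = 0: both sides -1
    rw [h0]
    simp [fairSplitAltLoop]
  · -- n ≥ 1
    have hS1 : ∀ (L : List Int), pvS L 1 = L.getD 0 0 := by
      intro L; simp [pvS, List.range_succ]
    have htotA : (fairSplitAltLoop A B (n - 1) 0 0 (-1)).1 + A.getD 0 0 = pvS A n := by
      rw [hsA, pvS_split A 1 n (le_refl 1) hpos, hS1 A]; ring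
    have htotB : (fairSplitAltLoop A B (n - 1) 0 0 (-1)).2.1 + B.getD 0 0 = pvS B n := by
      rw [hsB, pvS_split B 1 n (le_refl 1) hpos, hS1 B]; ring
    rw [if_pos hpos, if_pos hpos, htotA, htotB]
    by_cases hT : pvS A n = pvS B n
    · rw [if_pos hT]
      -- the two first-match predicates agree on every j ∈ range' 1 (n-1)
      have hpred : ∀ j ∈ List.range' 1 (n - 1),
          (decide (pvS A j = pvS B j ∧ pvS A n - pvS A j = pvS B n - pvS B j))
          = (decide ((0 : Int) + pvSeg A j (n - 1) = 0 + pvSeg B j (n - 1))) := by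
        intro j hj
        have hjb := List.mem_range'_1.mp hj
        have hj1 : 1 ≤ j := hjb.1
        have hjn : j ≤ n := by omega
        have hA := pvS_split A j n hj1 hjn
        have hB := pvS_split B j n hj1 hjn
        apply decide_eq_decide.mpr
        constructor
        · rintro ⟨e1, e2⟩; linarith
        · intro e; exact ⟨by linarith, by linarith⟩
      rw [find?_congr_mem _ _ _ hpred]
    · rw [if_neg hT]
      -- A's predicate is everywhere false when the totals differ
      have hpred : ∀ j ∈ List.range' 1 (n - 1),
          (decide (pvS A j = pvS B j ∧ pvS A n - pvS A j = pvS B n - pvS B j))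
          = (fun (_ : Nat) => false) j := by
        intro j _
        simp only [decide_eq_false_iff_not]
        rintro ⟨e1, e2⟩
        exact hT (by linarith)
      rw [find?_congr_mem _ _ _ hpred]
      have hnone : (List.range' 1 (n - 1)).find? (fun (_ : Nat) => false) = none := by
        rw [List.find?_eq_none]; intro a _; simp
      rw [hnone]
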